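-- pv_equiv track=rewrite | github.com/aki274415919/foritgate_policy | fortigate.py | get_all_members
-- ===== SOURCE A (Python) =====
-- def get_all_members(name, groups, group_lookup, _visited=None):
--     if _visited is None:
--         _visited = set()
--     name_key = name.strip().lower()
--     if name_key in _visited:
--         return set()  # 防止死循环
--     _visited.add(name_key)
--     if name_key in group_lookup:
--         real_name = group_lookup[name_key]
--         group = groups.get(real_name)
--         if group:
--             all_members = set()
--             for member in group.get('members', []):
--                 all_members |= get_all_members(member, groups, group_lookup, _visited)
--             return all_members
--     return {name.strip()}
-- ===== SOURCE B (Python) =====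
-- def get_all_members(name, groups, group_lookup, _visited=None):
--     if _visited is None:
--         _visited = set()
--     result = set()
--     stack = [name]
--     while stack:
--         current = stack.pop(0)
--         key = current.strip().lower()
--         if key in _visited:
--             continue
--         _visited.add(key)
--         if key in group_lookup:
--             group = groups.get(group_lookup[key])
--             if group:
--                 stack[:0] = group.get('members', [])
--                 continue
--         result.add(current.strip())
--     return result
-- ===== Notes on version B (the rewrite author's own statement) =====
-- stated objective: alternative
-- what changed: Replaced the recursive set-union expansion by an iterative worklist loop: one front-popping stack holds the names still to process, expansion prepends a group's members, and leaves are added to a single accumulated result set instead of unioning sets returned from recursive calls.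
import Mathlib
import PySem

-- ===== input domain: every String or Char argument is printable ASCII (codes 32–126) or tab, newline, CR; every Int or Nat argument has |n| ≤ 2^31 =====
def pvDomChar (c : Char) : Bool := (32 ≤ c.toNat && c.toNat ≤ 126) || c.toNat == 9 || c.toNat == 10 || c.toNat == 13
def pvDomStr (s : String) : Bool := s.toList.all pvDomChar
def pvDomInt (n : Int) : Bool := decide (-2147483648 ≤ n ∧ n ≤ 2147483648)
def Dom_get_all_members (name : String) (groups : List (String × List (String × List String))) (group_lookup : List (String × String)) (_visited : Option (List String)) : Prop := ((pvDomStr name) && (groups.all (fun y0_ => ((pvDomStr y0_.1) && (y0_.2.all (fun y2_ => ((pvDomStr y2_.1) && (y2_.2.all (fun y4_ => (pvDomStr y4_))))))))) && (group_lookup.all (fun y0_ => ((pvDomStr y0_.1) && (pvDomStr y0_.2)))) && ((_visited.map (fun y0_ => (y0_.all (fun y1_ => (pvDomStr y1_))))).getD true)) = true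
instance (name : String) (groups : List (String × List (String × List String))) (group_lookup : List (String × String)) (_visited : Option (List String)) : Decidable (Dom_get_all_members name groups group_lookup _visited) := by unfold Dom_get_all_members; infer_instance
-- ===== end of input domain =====

-- B replaces A's recursive set-union expansion by an iterative worklist loop (same cost); like A,
-- the Python B mutates a caller-supplied `_visited` in place — the equivalence proved here is about the return value.


-- Termination measure (used by the `decreasing_by` clauses of both ports, hence placed above them):
-- the number of group_lookup entries whose key has not been visited yet.
def pvUnvis (gl : List (String × String)) (v : List String) : Nat :=
  gl.countP (fun p => !(v.contains p.1))

theorem pvUnvis_mono (gl : List (String × String)) {v w : List String}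
    (h : ∀ x, x ∈ v → x ∈ w) : pvUnvis gl w ≤ pvUnvis gl v := by
  refine List.countP_mono_left (fun q _ hq => ?_)
  simp only [Bool.not_eq_true', List.contains_eq_mem, decide_eq_false_iff_not] at hq ⊢
  exact fun hv => hq (h _ hv)

theorem pvUnvis_subset_le (gl : List (String × String)) (v : List String) (k : String) :
    pvUnvis gl (PySem.Set.add v k) ≤ pvUnvis gl v :=
  pvUnvis_mono gl (fun x hx => (PySem.Set.mem_add v k x).mpr (Or.inl hx))

theorem pv_countP_lt (tl : List (String × String)) (v : List String) (k : String)
    (p : String × String) (hp : p ∈ tl) (hpk : p.1 = k) (hkv : k ∉ v) :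
    tl.countP (fun q => !((v ++ [k]).contains q.1)) < tl.countP (fun q => !(v.contains q.1)) := by
  induction tl with
  | nil => simp at hp
  | cons q tl ih =>
    simp only [List.countP_cons]
    have hmono : tl.countP (fun q => !((v ++ [k]).contains q.1))
        ≤ tl.countP (fun q => !(v.contains q.1)) := by
      refine List.countP_mono_left (fun a _ ha => ?_)
      simp only [Bool.not_eq_true', List.contains_eq_mem, decide_eq_false_iff_not] at ha ⊢
      exact fun hv => ha (by simp [hv])
    have himp : (!((v ++ [k]).contains q.1)) = true → (!(v.contains q.1)) = true := by
      simp only [Bool.not_eq_true', List.contains_eq_mem, decide_eq_false_iff_not]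
      intro hnq hvq
      exact hnq (by simp [hvq])
    rcases List.mem_cons.mp hp with hq | hq
    · subst hq
      have h1 : ((v ++ [k]).contains p.1) = true := by
        simp [List.contains_eq_mem, hpk]
      have h2 : (v.contains p.1) = false := by
        simp [List.contains_eq_mem, hpk, hkv]
      simp only [h1, h2, Bool.not_true, Bool.not_false, if_true]
      simp only [Bool.false_eq_true, if_false]
      omega
    · have ihh := ih hq
      split_ifs with ha hb hb
      · omega
      · exact absurd (himp ha) hb
      · omega
      · omega

theorem pvUnvis_lt (gl : List (String × String)) (v : List String) (k : String) {r : String}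
    (hk : PySem.Dict.get? (PySem.Dict.mk gl) k = some r)
    (hv : ¬ (PySem.Set.contains v k = true)) :
    pvUnvis gl (PySem.Set.add v k) < pvUnvis gl v := by
  have hkv : k ∉ v := fun h => hv ((PySem.Set.contains_iff v k).mpr h)
  have hadd : PySem.Set.add v k = v ++ [k] := by
    simp [PySem.Set.add, PySem.Set.contains, List.contains_eq_mem, hkv]
  obtain ⟨p, hp, hpk'⟩ : ∃ p ∈ gl, p.1 = k := by
    simp only [PySem.Dict.get?, Option.map_eq_some_iff] at hk
    obtain ⟨q, hq, -⟩ := hk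
    have h1 := List.mem_of_find?_eq_some hq
    have h2 := List.find?_some hq
    exact ⟨q, h1, by simpa using h2⟩
  rw [hadd]
  exact pv_countP_lt gl v k p hp hpk' hkv

theorem pvLex {a a' b b' : Nat} (h1 : a' ≤ a) (h2 : b' < b) :
    Prod.Lex (· < ·) (· < ·) (a', b') (a, b) := by
  rcases lt_or_eq_of_le h1 with h | h
  · exact Prod.Lex.left _ _ h
  · subst h; exact Prod.Lex.right _ h2

-- ===== PORT A =====
-- Literal port of A. The recursion terminates because every expansion step adds an unvisited
-- group_lookup key to `_visited`; the subtype result records only that `_visited` grows, which the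
-- termination argument needs. `pvGoA` is one call of A (returning the result set and the updated
-- visited set); `pvGoListA` is A's `for member in …: all_members |= …` loop.
mutual
def pvGoA (groups : List (String × List (String × List String))) (gl : List (String × String))
    (name : String) (v : List String) :
    {p : (List String) × (List String) // ∀ x, x ∈ v → x ∈ p.2} :=
  let name_key := PySem.Str.lower (PySem.Str.strip name)
  if hv : PySem.Set.contains v name_key then
    ⟨([], v), fun _ hx => hx⟩
  else
    match hk : PySem.Dict.get? (PySem.Dict.mk gl) name_key with
    | some real_name =>
      match PySem.Dict.get? (PySem.Dict.mk groups) real_name with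
      | some group =>
        if group.isEmpty then
          ⟨([PySem.Str.strip name], PySem.Set.add v name_key),
            fun x hx => (PySem.Set.mem_add v name_key x).mpr (Or.inl hx)⟩
        else
          let r := pvGoListA groups gl (PySem.Dict.getD (PySem.Dict.mk group) "members" []) []
            (PySem.Set.add v name_key)
          ⟨r.1, fun x hx => r.2 x ((PySem.Set.mem_add v name_key x).mpr (Or.inl hx))⟩
      | none =>
        ⟨([PySem.Str.strip name], PySem.Set.add v name_key),
          fun x hx => (PySem.Set.mem_add v name_key x).mpr (Or.inl hx)⟩
    | none =>
      ⟨([PySem.Str.strip name], PySem.Set.add v name_key),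
        fun x hx => (PySem.Set.mem_add v name_key x).mpr (Or.inl hx)⟩
termination_by (pvUnvis gl v, 0)
decreasing_by
  exact Prod.Lex.left _ _ (pvUnvis_lt gl v _ hk hv)

def pvGoListA (groups : List (String × List (String × List String))) (gl : List (String × String))
    (ms : List String) (acc : List String) (v : List String) :
    {p : (List String) × (List String) // ∀ x, x ∈ v → x ∈ p.2} :=
  match ms with
  | [] => ⟨(acc, v), fun _ hx => hx⟩
  | m :: rest =>
    let r := pvGoA groups gl m v
    let r2 := pvGoListA groups gl rest (PySem.Set.union acc r.1.1) r.1.2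
    ⟨r2.1, fun x hx => r2.2 x (r.2 x hx)⟩
termination_by (pvUnvis gl v, ms.length + 1)
decreasing_by
  · exact Prod.Lex.right _ (by omega)
  · exact pvLex (pvUnvis_mono gl r.2) (by simp)
end

def get_all_members (name : String) (groups : List (String × List (String × List String))) (group_lookup : List (String × String)) (_visited : Option (List String)) : List String :=
  (pvGoA groups group_lookup name (_visited.getD [])).1.1

-- ===== PORT B =====
-- Literal port of B: an iterative worklist loop; `stack` holds names still to process (popped from
-- the front), expansion prepends a group's members, leaves are added to the single result set `acc`.
def pvGoB (groups : List (String × List (String × List String))) (gl : List (String × String))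
    (stack : List String) (acc : List String) (v : List String) :
    (List String) × (List String) :=
  match stack with
  | [] => (acc, v)
  | current :: rest =>
    let key := PySem.Str.lower (PySem.Str.strip current)
    if hv : PySem.Set.contains v key then
      pvGoB groups gl rest acc v
    else
      match hk : PySem.Dict.get? (PySem.Dict.mk gl) key with
      | some real_name =>
        match PySem.Dict.get? (PySem.Dict.mk groups) real_name with
        | some group =>
          if group.isEmpty then
            pvGoB groups gl rest (PySem.Set.add acc (PySem.Str.strip current)) (PySem.Set.add v key)
          else
            pvGoB groups gl (PySem.Dict.getD (PySem.Dict.mk group) "members" [] ++ rest) acc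
              (PySem.Set.add v key)
        | none =>
          pvGoB groups gl rest (PySem.Set.add acc (PySem.Str.strip current)) (PySem.Set.add v key)
      | none =>
        pvGoB groups gl rest (PySem.Set.add acc (PySem.Str.strip current)) (PySem.Set.add v key)
termination_by (pvUnvis gl v, stack.length)
decreasing_by
  · exact pvLex (le_refl _) (by simp)
  · exact pvLex (pvUnvis_subset_le gl v key) (by simp)
  · exact Prod.Lex.left _ _ (pvUnvis_lt gl v key hk hv)
  · exact pvLex (pvUnvis_subset_le gl v key) (by simp)

def get_all_members_alt (name : String) (groups : List (String × List (String × List String))) (group_lookup : List (String × String)) (_visited : Option (List String)) : List String :=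
  (pvGoB groups group_lookup [name] [] (_visited.getD [])).1

-- ===== PRECONDITION & SPEC =====
def Spec_get_all_members (name : String) (groups : List (String × List (String × List String))) (group_lookup : List (String × String)) (_visited : Option (List String)) (out : List String) : Prop := out = get_all_members_alt name groups group_lookup _visited
instance (name : String) (groups : List (String × List (String × List String))) (group_lookup : List (String × String)) (_visited : Option (List String)) (out : List String) : Decidable (Spec_get_all_members name groups group_lookup _visited out) := by unfold Spec_get_all_members; infer_instance

-- ===== CLAIM (what is proved, stated in full; the proofs are below) =====
def Claim_equal_get_all_members : Prop := ∀ (name : String) (groups : List (String × List (String × List String))) (group_lookup : List (String × String)) (_visited : Option (List String)), Dom_get_all_members name groups group_lookup _visited → Spec_get_all_members name groups group_lookup _visited (get_all_members name groups group_lookup _visited)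

-- ===== LEMMAS AND PROOFS =====

theorem pv_union_nil_right (s : List String) : PySem.Set.union s [] = s := rfl

theorem pv_union_singleton (s : List String) (x : String) :
    PySem.Set.union s [x] = PySem.Set.add s x := rfl

theorem pv_foldl_add_add (t : List String) (s : List String) (x : String) :
    List.foldl PySem.Set.add s (PySem.Set.add t x) = PySem.Set.add (List.foldl PySem.Set.add s t) x := by
  by_cases hc : x ∈ t
  · have h1 : PySem.Set.add t x = t := by
      simp [PySem.Set.add, List.contains_eq_mem, hc]
    have hx : x ∈ List.foldl PySem.Set.add s t := (PySem.Set.mem_union s t x).mpr (Or.inr hc)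
    have h2 : PySem.Set.add (List.foldl PySem.Set.add s t) x = List.foldl PySem.Set.add s t := by
      simp [PySem.Set.add, List.contains_eq_mem, hx]
    rw [h1, h2]
  · have h1 : PySem.Set.add t x = t ++ [x] := by
      simp [PySem.Set.add, List.contains_eq_mem, hc]
    rw [h1, List.foldl_append]
    rfl

theorem pv_union_assoc (s t u : List String) :
    PySem.Set.union s (PySem.Set.union t u) = PySem.Set.union (PySem.Set.union s t) u := by
  show List.foldl PySem.Set.add s (List.foldl PySem.Set.add t u)
      = List.foldl PySem.Set.add (List.foldl PySem.Set.add s t) u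
  induction u generalizing t with
  | nil => rfl
  | cons x u' ih =>
    simp only [List.foldl_cons]
    rw [ih (PySem.Set.add t x), pv_foldl_add_add]

theorem pv_union_nil_left (r : List String) (h : r.Nodup) : PySem.Set.union [] r = r := by
  have := PySem.Set.ofList_eq_self_of_nodup r h
  simpa [PySem.Set.ofList_eq_foldl, PySem.Set.union, PySem.Set.update] using this

-- goA results are duplicate-free sets
theorem pvGoListA_nodup (groups : List (String × List (String × List String)))
    (gl : List (String × String)) (ms : List String) (acc v : List String)
    (h : acc.Nodup) : ((pvGoListA groups gl ms acc v).1.1).Nodup := by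
  induction ms generalizing acc v with
  | nil => rw [pvGoListA]; exact h
  | cons m rest ih =>
    rw [pvGoListA]
    exact ih _ _ (PySem.Set.nodup_union acc _ h)

theorem pvGoA_nodup (groups : List (String × List (String × List String)))
    (gl : List (String × String)) (name : String) (v : List String) :
    ((pvGoA groups gl name v).1.1).Nodup := by
  rw [pvGoA]
  split
  · exact List.nodup_nil
  · split
    · split
      · split
        · exact List.nodup_singleton _
        · exact pvGoListA_nodup _ _ _ _ _ List.nodup_nil
      · exact List.nodup_singleton _
    · exact List.nodup_singleton _

-- the accumulator of A's member loop can be pulled out as a union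
theorem pvGoListA_shift (groups : List (String × List (String × List String)))
    (gl : List (String × String)) (ms : List String) (a b v : List String) :
    (pvGoListA groups gl ms (PySem.Set.union a b) v).1
      = (PySem.Set.union a (pvGoListA groups gl ms b v).1.1, (pvGoListA groups gl ms b v).1.2) := by
  induction ms generalizing b v with
  | nil => rw [pvGoListA, pvGoListA]
  | cons m rest ih =>
    rw [pvGoListA]
    conv_rhs => rw [pvGoListA]
    show (pvGoListA groups gl rest
        (PySem.Set.union (PySem.Set.union a b) ((pvGoA groups gl m v).1.1))
        ((pvGoA groups gl m v).1.2)).1 = _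
    rw [← pv_union_assoc]
    exact ih _ _

-- the bridge: B's member loop over a prepended list is A's member loop
theorem pv_bridge_list (groups : List (String × List (String × List String)))
    (gl : List (String × String)) (k : Nat)
    (hT : ∀ v, pvUnvis gl v ≤ k → ∀ (cur : String) (rest acc : List String),
      pvGoB groups gl (cur :: rest) acc v
        = pvGoB groups gl rest (PySem.Set.union acc (pvGoA groups gl cur v).1.1)
            (pvGoA groups gl cur v).1.2) :
    ∀ (ms : List String) (v : List String), pvUnvis gl v ≤ k → ∀ (rest acc : List String),
      pvGoB groups gl (ms ++ rest) acc v
        = pvGoB groups gl rest (pvGoListA groups gl ms acc v).1.1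
            (pvGoListA groups gl ms acc v).1.2 := by
  intro ms
  induction ms with
  | nil =>
    intro v hv rest acc
    rw [pvGoListA]
    rfl
  | cons m ms' ih =>
    intro v hv rest acc
    rw [List.cons_append, hT v hv m (ms' ++ rest) acc,
      ih ((pvGoA groups gl m v).1.2)
        (le_trans (pvUnvis_mono gl (pvGoA groups gl m v).2) hv) rest
        (PySem.Set.union acc (pvGoA groups gl m v).1.1)]
    conv_rhs => rw [pvGoListA]

-- the bridge: processing one stack entry in B is one recursive call of A
theorem pv_bridge (groups : List (String × List (String × List String)))
    (gl : List (String × String)) :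
    ∀ n v, pvUnvis gl v ≤ n → ∀ (cur : String) (rest acc : List String),
      pvGoB groups gl (cur :: rest) acc v
        = pvGoB groups gl rest (PySem.Set.union acc (pvGoA groups gl cur v).1.1) (pvGoA groups gl cur v).1.2 := by
  intro n
  induction n using Nat.strong_induction_on with
  | _ n IH =>
  intro v hvn cur rest acc
  rw [pvGoB, pvGoA]
  split
  · -- already visited
    rw [pv_union_nil_right]
  · -- fresh name
    rename_i hc
    split
    · -- name_key is a group alias
      rename_i real_name hgk
      split
      · -- the group exists
        rename_i group hgg
        split
      
        · -- empty (falsy) group: leaf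
          rw [pv_union_singleton]
        · -- truthy group: expand its members
          rename_i hie
          have hlt : pvUnvis gl (PySem.Set.add v (PySem.Str.lower (PySem.Str.strip cur))) < pvUnvis gl v :=
            pvUnvis_lt gl v _ hgk hc
          have hT : ∀ v', pvUnvis gl v' ≤ pvUnvis gl (PySem.Set.add v (PySem.Str.lower (PySem.Str.strip cur))) →
              ∀ (c : String) (r a : List String),
              pvGoB groups gl (c :: r) a v'
                = pvGoB groups gl r (PySem.Set.union a (pvGoA groups gl c v').1.1) (pvGoA groups gl c v').1.2 :=
            IH _ (lt_of_lt_of_le hlt hvn)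
          rw [pv_bridge_list groups gl _ hT _ _ (le_refl _) rest acc]
          have hs := pvGoListA_shift groups gl
            (PySem.Dict.getD (PySem.Dict.mk group) "members" []) acc []
            (PySem.Set.add v (PySem.Str.lower (PySem.Str.strip cur)))
          rw [pv_union_nil_right] at hs
          rw [congrArg Prod.fst hs, congrArg Prod.snd hs]
      · -- no such group: leaf
        rw [pv_union_singleton]
    · -- not a group alias: leaf
      rw [pv_union_singleton]

-- ===== VERDICT (by name: the statement is the Claim_ definition above) =====
theorem get_all_members_spec : Claim_equal_get_all_members := by
  intro name groups gl _visited _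
  unfold Spec_get_all_members get_all_members get_all_members_alt
  rw [pv_bridge groups gl (pvUnvis gl (_visited.getD [])) _ (le_refl _)]
  rw [pvGoB]
  have h := pvGoA_nodup groups gl name (_visited.getD [])
  rw [pv_union_nil_left _ h]
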